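-- pv_equiv track=rewrite | github.com/tobeck/manasink-ml | src/data/features.py | _encode_color_identity
-- ===== SOURCE A (Python) =====
-- def _encode_color_identity(color_identity: list[str]) -> int:
--     """Encode color identity as 5-bit WUBRG bitmap."""
--     if not color_identity:
--         return 0
--
--     bitmap = 0
--     color_map = {"W": 0, "U": 1, "B": 2, "R": 3, "G": 4}
--
--     for color in color_identity:
--         if color in color_map:
--             bitmap |= 1 << color_map[color]
--
--     return bitmap
-- ===== SOURCE B (Python) =====
-- def _encode_color_identity(color_identity: list[str]) -> int:
--     """Encode color identity as 5-bit WUBRG bitmap."""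
--     return sum(1 << i for i, c in enumerate("WUBRG") if c in color_identity)
-- ===== Notes on version B (the rewrite author's own statement) =====
-- stated objective: idiomatic
-- what changed: Instead of looping over the input list with a dict lookup and OR-ing bits in, B iterates the fixed WUBRG alphabet by index and sums 1<<i for each color present via a membership test, with no empty-list guard or dict.
import Mathlib
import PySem

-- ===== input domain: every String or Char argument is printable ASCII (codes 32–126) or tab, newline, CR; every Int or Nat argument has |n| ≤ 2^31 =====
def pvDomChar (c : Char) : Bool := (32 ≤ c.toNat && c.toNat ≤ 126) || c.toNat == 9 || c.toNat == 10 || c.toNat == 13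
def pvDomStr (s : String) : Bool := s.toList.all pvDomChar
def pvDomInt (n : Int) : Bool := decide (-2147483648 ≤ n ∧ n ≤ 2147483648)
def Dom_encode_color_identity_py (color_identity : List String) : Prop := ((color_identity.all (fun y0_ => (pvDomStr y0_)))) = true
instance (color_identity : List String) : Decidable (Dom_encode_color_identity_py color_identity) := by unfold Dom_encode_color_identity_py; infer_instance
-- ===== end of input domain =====

-- B encodes the bitmap by iterating the fixed WUBRG alphabet with membership tests
-- instead of looping the input with a dict lookup (objective: idiomatic; same cost).

-- ===== PORT A =====
-- literal port of A: the dict literal, and the loop body 'if color in color_map: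
-- bitmap |= 1 << color_map[color]' as a named helper (dict values are the literal
-- nonnegative shifts 0..4, so .toNat on them is exact).
def pvColorMap : PySem.Dict String Int :=
  PySem.Dict.ofList [("W", 0), ("U", 1), ("B", 2), ("R", 3), ("G", 4)]

def pvStepA (bitmap : Int) (color : String) : Int :=
  match pvColorMap.get? color with
  | some k => PySem.Int.bor bitmap ((1 : Int) <<< k.toNat)
  | none => bitmap

def encode_color_identity_py (color_identity : List String) : Int :=
  if color_identity = [] then 0
  else color_identity.foldl pvStepA 0

-- ===== PORT B =====
-- literal port of B: sum(1 << i for i, c in enumerate("WUBRG") if c in color_identity)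
def encode_color_identity_py_alt (color_identity : List String) : Int :=
  (PySem.List.enumerate ["W", "U", "B", "R", "G"] 0).foldl
    (fun acc p => if p.2 ∈ color_identity then acc + ((1 : Int) <<< p.1.toNat) else acc) 0

-- ===== PRECONDITION & SPEC =====
def Spec_encode_color_identity_py (color_identity : List String) (out : Int) : Prop := out = encode_color_identity_py_alt color_identity
instance (color_identity : List String) (out : Int) : Decidable (Spec_encode_color_identity_py color_identity out) := by unfold Spec_encode_color_identity_py; infer_instance

-- ===== CLAIM (what is proved, stated in full; the proofs are below) =====
def Claim_equal_encode_color_identity_py : Prop := ∀ (color_identity : List String), Dom_encode_color_identity_py color_identity → Spec_encode_color_identity_py color_identity (encode_color_identity_py color_identity)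

-- ===== LEMMAS AND PROOFS =====

-- the five-flag bitmap value both loops maintain
def pvVal (w u b r g : Bool) : Int :=
  (if w then 1 else 0) + (if u then 2 else 0) + (if b then 4 else 0) +
  (if r then 8 else 0) + (if g then 16 else 0)

lemma pvStepW : ∀ w u b r g : Bool, pvStepA (pvVal w u b r g) "W" = pvVal true u b r g := by decide
lemma pvStepU : ∀ w u b r g : Bool, pvStepA (pvVal w u b r g) "U" = pvVal w true b r g := by decide
lemma pvStepB : ∀ w u b r g : Bool, pvStepA (pvVal w u b r g) "B" = pvVal w u true r g := by decide
lemma pvStepR : ∀ w u b r g : Bool, pvStepA (pvVal w u b r g) "R" = pvVal w u b true g := by decide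
lemma pvStepG : ∀ w u b r g : Bool, pvStepA (pvVal w u b r g) "G" = pvVal w u b r true := by decide

lemma pvStepNone (x : String) (hW : x ≠ "W") (hU : x ≠ "U") (hB : x ≠ "B")
    (hR : x ≠ "R") (hG : x ≠ "G") (v : Int) : pvStepA v x = v := by
  have hnone : pvColorMap.get? x = none := by
    simp [pvColorMap, PySem.Dict.ofList, PySem.Dict.update,
      PySem.Dict.get?_insert_of_ne, hW, hU, hB, hR, hG]
  simp [pvStepA, hnone]

-- A's loop turns the accumulator's flags on exactly where the colors occur in the list
lemma pvFoldA (l : List String) : ∀ w u b r g : Bool,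
    l.foldl pvStepA (pvVal w u b r g)
    = pvVal (w || decide ("W" ∈ l)) (u || decide ("U" ∈ l)) (b || decide ("B" ∈ l))
            (r || decide ("R" ∈ l)) (g || decide ("G" ∈ l)) := by
  induction l with
  | nil => simp
  | cons x t ih =>
    intro w u b r g
    by_cases hW : x = "W"
    · subst hW; simp only [List.foldl_cons, pvStepW, ih]; simp
    · by_cases hU : x = "U"
      · subst hU; simp only [List.foldl_cons, pvStepU, ih]
        simp
      · by_cases hB : x = "B"
        · subst hB; simp only [List.foldl_cons, pvStepB, ih]
          simp
        · by_cases hR : x = "R"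
          · subst hR; simp only [List.foldl_cons, pvStepR, ih]
            simp
          · by_cases hG : x = "G"
            · subst hG; simp only [List.foldl_cons, pvStepG, ih]
              simp
            · simp only [List.foldl_cons, pvStepNone x hW hU hB hR hG, ih]
              simp [List.mem_cons, Ne.symm hW, Ne.symm hU, Ne.symm hB, Ne.symm hR, Ne.symm hG]

-- B computes the same five-flag value
lemma pvAltEq (l : List String) :
    encode_color_identity_py_alt l
    = pvVal (decide ("W" ∈ l)) (decide ("U" ∈ l)) (decide ("B" ∈ l))
            (decide ("R" ∈ l)) (decide ("G" ∈ l)) := by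
  unfold encode_color_identity_py_alt
  simp only [PySem.List.enumerate_cons, PySem.List.enumerate_nil, List.foldl_cons, List.foldl_nil]
  by_cases hW : "W" ∈ l <;> by_cases hU : "U" ∈ l <;> by_cases hB : "B" ∈ l <;>
    by_cases hR : "R" ∈ l <;> by_cases hG : "G" ∈ l <;>
    simp [hW, hU, hB, hR, hG, pvVal] <;> decide

-- ===== VERDICT (by name: the statement is the Claim_ definition above) =====
theorem encode_color_identity_py_spec : Claim_equal_encode_color_identity_py := by
  intro l _
  unfold Spec_encode_color_identity_py encode_color_identity_py
  rw [pvAltEq]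
  by_cases h : l = []
  · subst h; simp [pvVal]
  · simp only [h, if_false]
    have := pvFoldA l false false false false false
    simpa using this
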